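-- pv_equiv track=rewrite | github.com/lingpy/lingpy | lingpy/algorithm/cluster_util.py | valid_cluster
-- ===== SOURCE A (Python) =====
-- def valid_cluster(sequence):
--     """Only allow to have sequences which have consecutive ordering of elements.
--
--     Parameters
--     ----------
--     sequence : list
--         A cluster sequence in which elements should be consecutively ordered, starting from
--         0, and identical segments in the sequence retrieve the same number.
--
--     Returns
--     -------
--     valid_cluster : bool
--         True, if the cluster is valid, and False if it judged to be invalid.
--
--     Examples
--     --------
--     We define a valid and an invalid cluster sequence:
--
--         >>> clrA = [0, 1, 2, 3]
--         >>> clrB = [1, 1, 2, 3] # should be [0, 0, 1, 2]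
--         >>> from lingpy.algorithm.utils import valid_cluster
--         >>> valid_cluster(clrA)
--         True
--         >>> valid_cluster(clrB)
--         False
--
--     Seealso:
--     --------
--     generate_all_clusters
--     generate_random_cluster
--     order_cluster
--     mutate_cluster
--
--     """
--     visited = set()
--     maxelm = -1
--     for segment in sequence:
--         if segment not in visited:
--             if segment != maxelm + 1:
--                 return False
--             visited.add(segment)
--             maxelm = segment
--     return True
-- ===== SOURCE B (Python) =====
-- def valid_cluster(sequence):
--     seen = []
--     seen_set = set()
--     for segment in sequence:
--         if segment not in seen_set:
--             seen_set.add(segment)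
--             seen.append(segment)
--     return seen == list(range(len(seen)))
-- ===== Notes on version B (the rewrite author's own statement) =====
-- stated objective: alternative
-- what changed: B collects the distinct values in order of first appearance (no running-max comparison, no early exit) and then decides validity with a single final structural comparison of that list against list(range(len(seen))).
import Mathlib
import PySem

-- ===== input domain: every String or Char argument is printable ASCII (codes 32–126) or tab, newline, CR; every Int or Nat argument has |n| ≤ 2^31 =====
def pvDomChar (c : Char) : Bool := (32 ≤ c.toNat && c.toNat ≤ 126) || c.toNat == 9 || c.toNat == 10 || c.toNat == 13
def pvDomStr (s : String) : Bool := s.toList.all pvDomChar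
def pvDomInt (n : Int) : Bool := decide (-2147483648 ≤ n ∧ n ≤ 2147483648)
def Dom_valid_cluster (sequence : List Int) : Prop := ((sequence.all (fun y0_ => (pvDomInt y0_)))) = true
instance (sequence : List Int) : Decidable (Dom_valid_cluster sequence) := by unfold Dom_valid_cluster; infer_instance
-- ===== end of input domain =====

-- B replaces A's running-max scan with early return by collecting first occurrences
-- and one final structural comparison against the identity range (alternative decomposition).

-- ===== PORT A =====
-- A's loop with early return, ported as structural recursion over the remaining sequence
def valid_cluster_go (visited : PySem.Set Int) (maxelm : Int) : List Int → Bool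
  | [] => true
  | segment :: rest =>
    if ¬ PySem.Set.contains visited segment then
      if segment ≠ maxelm + 1 then false
      else valid_cluster_go (PySem.Set.add visited segment) segment rest
    else valid_cluster_go visited maxelm rest

def valid_cluster (sequence : List Int) : Bool :=
  valid_cluster_go PySem.Set.empty (-1) sequence

-- ===== PORT B =====
-- phase 1: collect the distinct values in order of first appearance
def collectSeen2 (seen : List Int) (seenSet : PySem.Set Int) : List Int → List Int
  | [] => seen
  | segment :: rest =>
    if ¬ PySem.Set.contains seenSet segment then
      collectSeen2 (seen ++ [segment]) (PySem.Set.add seenSet segment) rest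
    else collectSeen2 seen seenSet rest

def valid_cluster_alt (sequence : List Int) : Bool :=
  let seen := collectSeen2 [] PySem.Set.empty sequence
  -- phase 2: seen == list(range(len(seen)))
  decide (seen = PySem.List.pyRange 0 (seen.length : Int) 1)

-- ===== PRECONDITION & SPEC =====
def Spec_valid_cluster (sequence : List Int) (out : Bool) : Prop := out = valid_cluster_alt sequence
instance (sequence : List Int) (out : Bool) : Decidable (Spec_valid_cluster sequence out) := by unfold Spec_valid_cluster; infer_instance

-- ===== CLAIM (what is proved, stated in full; the proofs are below) =====
def Claim_equal_valid_cluster : Prop := ∀ (sequence : List Int), Dom_valid_cluster sequence → Spec_valid_cluster sequence (valid_cluster sequence)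

-- ===== LEMMAS AND PROOFS =====

-- the identity range [0, 1, …, n-1] as integers
def pvRl (n : Nat) : List Int := (List.range n).map (Nat.cast : Nat → Int)

theorem pvRl_length (n : Nat) : (pvRl n).length = n := by simp [pvRl]

theorem pvRl_succ (n : Nat) : pvRl (n + 1) = pvRl n ++ [(n : Int)] := by
  simp [pvRl, List.range_succ]

theorem pyRange_eq_pvRl (n : Nat) : PySem.List.pyRange 0 (n : Int) 1 = pvRl n := by
  rw [PySem.List.pyRange_one]
  unfold pvRl
  have h : ((n : Int) - 0).toNat = n := by omega
  rw [h]
  refine List.map_congr_left (fun k _ => ?_)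
  show (0 : Int) + (k : Int) = (k : Int)
  omega

theorem set_contains_eq_mem (s : PySem.Set Int) (x : Int) :
    PySem.Set.contains s x = decide (x ∈ s) := by
  simp [PySem.Set.contains]

-- proof-only simplification of B's collector: the membership set always equals the seen list
def collectSeen (seen : List Int) : List Int → List Int
  | [] => seen
  | segment :: rest =>
    if segment ∉ seen then collectSeen (seen ++ [segment]) rest
    else collectSeen seen rest

theorem collectSeen2_eq (xs : List Int) : ∀ seen : List Int,
    collectSeen2 seen seen xs = collectSeen seen xs := by
  induction xs with
  | nil => intro seen; rfl
  | cons x xs ih =>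
    intro seen
    simp only [collectSeen2, collectSeen, set_contains_eq_mem]
    by_cases h : x ∈ seen
    · simp [h, ih]
    · simp [h, ih]

theorem collectSeen_prefix (xs : List Int) : ∀ seen, seen <+: collectSeen seen xs := by
  induction xs with
  | nil => intro seen; exact List.prefix_refl _
  | cons x xs ih =>
    intro seen
    simp only [collectSeen]
    split
    · exact List.IsPrefix.trans (List.prefix_append _ _) (ih _)
    · exact ih _

theorem valid_cluster_alt_eq (s : List Int) :
    valid_cluster_alt s = decide (collectSeen [] s = pvRl (collectSeen [] s).length) := by
  have h0 : collectSeen2 [] ([] : PySem.Set Int) s = collectSeen [] s := collectSeen2_eq s []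
  simp [valid_cluster_alt, h0, pyRange_eq_pvRl]

-- the loop invariant: started from the state 'values 0..n-1 already seen', A's loop
-- succeeds iff B's collected list equals the identity range of its own length
theorem pv_main (xs : List Int) : ∀ n : Nat,
    valid_cluster_go (pvRl n) ((n : Int) - 1) xs
      = decide (collectSeen (pvRl n) xs = pvRl (collectSeen (pvRl n) xs).length) := by
  induction xs with
  | nil =>
    intro n
    simp [valid_cluster_go, collectSeen, pvRl_length]
  | cons x xs ih =>
    intro n
    simp only [valid_cluster_go, collectSeen, set_contains_eq_mem]
    by_cases hmem : x ∈ pvRl n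
    · -- x already seen: both sides skip x
      simp only [hmem, decide_true, if_false, not_true_eq_false]
      exact ih n
    · simp only [hmem, decide_false, Bool.false_eq_true, not_false_eq_true, if_true]
      by_cases hx : x = (n : Int)
      · -- the expected next value: both states advance to 0..n
        subst hx
        rw [if_neg (show ¬ ((n : Int) ≠ (n : Int) - 1 + 1) by omega)]
        have hadd : PySem.Set.add (pvRl n) (n : Int) = pvRl (n + 1) := by
          simp [PySem.Set.add, hmem, pvRl_succ]
        rw [hadd, ← pvRl_succ,
            show ((n : Int)) = ((n + 1 : Nat) : Int) - 1 by push_cast; ring]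
        exact ih (n + 1)
      · -- A returns False here; B's final list keeps x ≠ n at index n, so it is no range
        rw [if_pos (show x ≠ (n : Int) - 1 + 1 by omega)]
        obtain ⟨t, ht⟩ := collectSeen_prefix xs (pvRl n ++ [x])
        symm
        rw [decide_eq_false_iff_not]
        intro heq
        rw [← ht] at heq
        have hn : ((pvRl n ++ [x] ++ t))[n]? = some x := by
          rw [List.getElem?_append_left (by simp [pvRl_length]),
              List.getElem?_append_right (by simp [pvRl_length])]
          simp [pvRl_length]
        have hlen : n < (pvRl n ++ [x] ++ t).length := by simp [pvRl_length]
        have hn' : (pvRl ((pvRl n ++ [x] ++ t)).length)[n]? = some ((n : Nat) : Int) := by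
          show ((List.range ((pvRl n ++ [x] ++ t)).length).map (Nat.cast : Nat → Int))[n]? = _
          rw [List.getElem?_map, List.getElem?_range hlen]
          rfl
        rw [heq, hn'] at hn
        exact hx (by simpa using hn.symm)

-- ===== VERDICT (by name: the statement is the Claim_ definition above) =====
theorem valid_cluster_spec : Claim_equal_valid_cluster := by
  intro sequence _
  unfold Spec_valid_cluster
  rw [valid_cluster_alt_eq]
  have h := pv_main sequence 0
  simpa [valid_cluster, pvRl] using h
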